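-- pv_equiv track=rewrite | github.com/Illuzzion/simple_phpvirus_scan | scanner.py | show_suspected_code
-- ===== SOURCE A (Python) =====
-- def show_suspected_code(string, suspected_word):
--
--     for rule in suspected_word:
--         try:
--             pos = string.index(rule)
--             start_pos = 0
--             end_pos = len(string)
--
--             if (pos - 20) >= 0:
--                 start_pos = pos - 20
--
--             if (pos + 30) <= end_pos:
--                 end_pos = pos + 30
--             yield string[start_pos:end_pos].strip()
--
--         except ValueError:
--             pass
-- ===== SOURCE B (Python) =====
-- def show_suspected_code(string, suspected_word):
--     # Single left-to-right sweep over the text: at each position record every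
--     # still-unfound word that starts there; then emit snippets in word order.
--     first = {}
--     pending = set(suspected_word)
--     for i in range(len(string) + 1):
--         if not pending:
--             break
--         hits = [w for w in pending if string.startswith(w, i)]
--         for w in hits:
--             first[w] = i
--             pending.discard(w)
--     for w in suspected_word:
--         if w in first:
--             p = first[w]
--             yield string[max(0, p - 20): p + 30].strip()
-- ===== Notes on version B (the rewrite author's own statement) =====
-- stated objective: alternative
-- what changed: Instead of calling str.index separately for each suspect word, B makes one left-to-right sweep over the text, recording at each position every still-unfound word that starts there (pending set, early exit once all are found), then emits the snippets in the original word order; it is not faster in CPython (A's per-word scans run in C).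
import Mathlib
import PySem

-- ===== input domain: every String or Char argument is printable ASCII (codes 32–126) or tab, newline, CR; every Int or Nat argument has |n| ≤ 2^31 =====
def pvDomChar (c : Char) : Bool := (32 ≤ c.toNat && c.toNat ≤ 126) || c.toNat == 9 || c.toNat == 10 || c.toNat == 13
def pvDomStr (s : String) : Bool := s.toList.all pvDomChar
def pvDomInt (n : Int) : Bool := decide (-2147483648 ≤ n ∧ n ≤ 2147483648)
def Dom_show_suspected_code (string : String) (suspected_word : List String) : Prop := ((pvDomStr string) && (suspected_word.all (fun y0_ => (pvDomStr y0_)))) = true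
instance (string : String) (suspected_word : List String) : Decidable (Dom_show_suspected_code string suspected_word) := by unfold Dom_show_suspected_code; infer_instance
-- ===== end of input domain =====

-- B replaces the per-word str.index scans by one left-to-right sweep over the text that
-- records the first start position of every still-unfound word (objective: alternative).
-- A is a generator; the equivalence is about the list of yielded values.

-- ===== PORT A =====
-- for each rule: pos = string.index(rule) (ValueError, i.e. find = -1, is caught: skip),
-- then yield string[start_pos:end_pos].strip() with the two conditional reassignments.
def show_suspected_code (string : String) (suspected_word : List String) : List String :=
  suspected_word.foldl (fun acc rule =>
    let pos := PySem.Str.find string rule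
    if pos = -1 then acc  -- string.index raised ValueError: except ... pass
    else
      let start_pos : Int := if pos - 20 ≥ 0 then pos - 20 else 0
      let end_pos : Int := if pos + 30 ≤ PySem.Str.len string then pos + 30 else PySem.Str.len string
      acc ++ [PySem.Str.strip (PySem.Str.slice string (some start_pos) (some end_pos))]) []

-- ===== PORT B =====
-- single sweep i = 0 .. len(string): hits = words of `pending` starting at i
-- (string.startswith(w, i) is ported as PySem.Chars.startswith on toList.drop i, exact for i ≥ 0);
-- 'if not pending: break' is ported as an unchanged state (the remaining iterations are no-ops);
-- then the snippets are emitted in suspected_word order.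
def show_suspected_code_alt (string : String) (suspected_word : List String) : List String :=
  let scan := (PySem.List.pyRange 0 (PySem.Str.len string + 1)).foldl
    (fun (st : PySem.Dict String Int × PySem.Set String) i =>
      if st.2.isEmpty then st  -- break
      else
        let hits := st.2.filter (fun w => PySem.Chars.startswith (string.toList.drop i.toNat) w.toList)
        hits.foldl (fun st w => (st.1.insert w i, PySem.Set.discard st.2 w)) st)
    (PySem.Dict.empty, PySem.Set.ofList suspected_word)
  suspected_word.foldl (fun acc w =>
    match scan.1.get? w with
    | some p => acc ++ [PySem.Str.strip (PySem.Str.slice string (some (max 0 (p - 20))) (some (p + 30)))]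
    | none => acc) []

-- ===== PRECONDITION & SPEC =====
def Spec_show_suspected_code (string : String) (suspected_word : List String) (out : List String) : Prop := out = show_suspected_code_alt string suspected_word
instance (string : String) (suspected_word : List String) (out : List String) : Decidable (Spec_show_suspected_code string suspected_word out) := by unfold Spec_show_suspected_code; infer_instance

-- ===== CLAIM (what is proved, stated in full; the proofs are below) =====
def Claim_equal_show_suspected_code : Prop := ∀ (string : String) (suspected_word : List String), Dom_show_suspected_code string suspected_word → Spec_show_suspected_code string suspected_word (show_suspected_code string suspected_word)

-- ===== LEMMAS AND PROOFS =====

-- spec of Chars.find when it does not return -1: first index i with w <+: s.drop i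
theorem pv_find_spec (s w : List Char) (h : PySem.Chars.find s w ≠ -1) :
    0 ≤ PySem.Chars.find s w ∧ w <+: s.drop (PySem.Chars.find s w).toNat ∧
      ∀ i : Nat, i < (PySem.Chars.find s w).toNat → ¬ w <+: s.drop i := by
  have h0 := PySem.Chars.findFrom_natCast_spec s w 0 (Nat.zero_le _)
  rw [Nat.cast_zero, PySem.Chars.findFrom_zero] at h0
  have h1 := h0 h
  exact ⟨h1.1, h1.2.1, fun i hi => h1.2.2 i (Nat.zero_le _) hi⟩

theorem pv_find_le_len (s w : List Char) (h : PySem.Chars.find s w ≠ -1) :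
    (PySem.Chars.find s w).toNat ≤ s.length := by
  obtain ⟨h0, hpre, hmin⟩ := pv_find_spec s w h
  by_contra hgt
  replace hgt := Nat.lt_of_not_le hgt
  have hnil : s.drop (PySem.Chars.find s w).toNat = [] := List.drop_eq_nil_of_le (le_of_lt hgt)
  have hw : w = [] := List.prefix_nil.mp (hnil ▸ hpre)
  have : (PySem.Chars.find s w).toNat > 0 := lt_of_le_of_lt (Nat.zero_le _) hgt
  exact hmin 0 this (by simp [hw])

-- if w starts at position m then find ≠ -1 and find ≤ m
theorem pv_find_of_occ (s w : List Char) (m : Nat) (hocc : w <+: s.drop m) :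
    PySem.Chars.find s w ≠ -1 ∧ (PySem.Chars.find s w).toNat ≤ m := by
  have hinf : w <:+: s := hocc.isInfix.trans (List.drop_suffix m s).isInfix
  have hne : PySem.Chars.find s w ≠ -1 := by
    intro hc; exact ((PySem.Chars.find_eq_neg_one_iff s w).mp hc) hinf
  refine ⟨hne, ?_⟩
  by_contra hgt
  replace hgt := Nat.lt_of_not_le hgt
  exact (pv_find_spec s w hne).2.2 m hgt hocc

-- the inner fold (for w in hits: first[w] = i; pending.discard(w)) : dict lookups
theorem pv_step_get? (hits : List String) (i : Int)
    (st : PySem.Dict String Int × PySem.Set String) (x : String) :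
    ((hits.foldl (fun st w => (st.1.insert w i, PySem.Set.discard st.2 w)) st).1.get? x)
      = if x ∈ hits then some i else st.1.get? x := by
  induction hits generalizing st with
  | nil => simp
  | cons h t ih =>
    simp only [List.foldl_cons, ih, List.mem_cons]
    by_cases hx : x ∈ t
    · simp [hx]
    · by_cases hxh : x = h
      · subst hxh; simp [hx, PySem.Dict.get?_insert_self]
      · simp [hx, hxh, PySem.Dict.get?_insert_of_ne _ _ hxh]

-- the inner fold: pending membership
theorem pv_step_mem (hits : List String) (i : Int)
    (st : PySem.Dict String Int × PySem.Set String) (x : String) :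
    (x ∈ (hits.foldl (fun st w => (st.1.insert w i, PySem.Set.discard st.2 w)) st).2)
      ↔ x ∈ st.2 ∧ x ∉ hits := by
  induction hits generalizing st with
  | nil => simp
  | cons h t ih =>
    simp only [List.foldl_cons, ih, PySem.Set.mem_discard, List.mem_cons]
    tauto

theorem pv_step_nodup (hits : List String) (i : Int)
    (st : PySem.Dict String Int × PySem.Set String) (hn : st.2.Nodup) :
    (hits.foldl (fun st w => (st.1.insert w i, PySem.Set.discard st.2 w)) st).2.Nodup := by
  induction hits generalizing st with
  | nil => exact hn
  | cons h t ih => exact ih _ (PySem.Set.nodup_discard _ _ hn)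

-- abbreviation used only by the proofs
def pvScanStep (s : List Char) : PySem.Dict String Int × PySem.Set String → Int → PySem.Dict String Int × PySem.Set String :=
  fun st i =>
    if st.2.isEmpty then st
    else
      (st.2.filter (fun w => PySem.Chars.startswith (s.drop i.toNat) w.toList)).foldl
        (fun st w => (st.1.insert w i, PySem.Set.discard st.2 w)) st

-- find = m when w starts at m but was not found before m
theorem pv_find_eq_of_occ_not_lt (s w : List Char) (m : Nat)
    (hocc : w <+: s.drop m)
    (hnot : ¬(PySem.Chars.find s w ≠ -1 ∧ (PySem.Chars.find s w).toNat < m)) :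
    PySem.Chars.find s w = (m : Int) := by
  obtain ⟨hne, hle⟩ := pv_find_of_occ s w m hocc
  have h0 := (pv_find_spec s w hne).1
  have hge : m ≤ (PySem.Chars.find s w).toNat := by
    by_contra hc
    exact hnot ⟨hne, by omega⟩
  omega

-- loop invariant of B's sweep after the first m positions
theorem pv_scan_invariant (s : List Char) (sw : List String) (m : Nat) :
    ((PySem.List.pyRange 0 (m : Int)).foldl (pvScanStep s) (PySem.Dict.empty, PySem.Set.ofList sw)).2.Nodup ∧
    (∀ w, w ∈ ((PySem.List.pyRange 0 (m : Int)).foldl (pvScanStep s) (PySem.Dict.empty, PySem.Set.ofList sw)).2 ↔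
        w ∈ sw ∧ ¬(PySem.Chars.find s w.toList ≠ -1 ∧ (PySem.Chars.find s w.toList).toNat < m)) ∧
    (∀ w, ((PySem.List.pyRange 0 (m : Int)).foldl (pvScanStep s) (PySem.Dict.empty, PySem.Set.ofList sw)).1.get? w =
        if w ∈ sw ∧ PySem.Chars.find s w.toList ≠ -1 ∧ (PySem.Chars.find s w.toList).toNat < m
        then some (PySem.Chars.find s w.toList) else none) := by
  induction m with
  | zero =>
    simp only [Nat.cast_zero]
    have hr : PySem.List.pyRange (0:Int) (0:Int) = [] := by simp [PySem.List.pyRange]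
    rw [hr]
    refine ⟨PySem.Set.nodup_ofList sw, ?_, ?_⟩
    · intro w; simp [PySem.Set.mem_ofList]
    · intro w; simp [PySem.Dict.get?_empty]
  | succ m ih =>
    obtain ⟨hnd, hmem, hget⟩ := ih
    have hcast : ((m + 1 : Nat) : Int) = (m : Int) + 1 := by push_cast; ring
    rw [hcast, PySem.List.pyRange_one_succ_right (by positivity), List.foldl_append]
    set st := (PySem.List.pyRange 0 (m : Int)).foldl (pvScanStep s) (PySem.Dict.empty, PySem.Set.ofList sw) with hst
    simp only [List.foldl_cons, List.foldl_nil]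
    by_cases hemp : st.2.isEmpty
    · -- 'break': the state no longer changes, and every word is already found
      have hstep : pvScanStep s st (m : Int) = st := by
        unfold pvScanStep; rw [if_pos hemp]
      rw [hstep]
      have hall : ∀ w ∈ sw, PySem.Chars.find s w.toList ≠ -1 ∧ (PySem.Chars.find s w.toList).toNat < m := by
        intro w hw
        by_contra hc
        have : w ∈ st.2 := (hmem w).mpr ⟨hw, hc⟩
        rw [List.isEmpty_iff.mp hemp] at this
        simp at this
      refine ⟨hnd, ?_, ?_⟩
      · intro w
        rw [hmem w]
        constructor
        · rintro ⟨hw, hc⟩; exact absurd (hall w hw) (by intro h; exact hc ⟨h.1, by omega⟩)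
        · rintro ⟨hw, hc⟩; exact absurd (hall w hw) (by intro h; exact hc ⟨h.1, by omega⟩)
      · intro w
        rw [hget w]
        by_cases hw : w ∈ sw
        · have h := hall w hw
          rw [if_pos ⟨hw, h.1, h.2⟩, if_pos ⟨hw, h.1, by omega⟩]
        · rw [if_neg (by tauto), if_neg (by tauto)]
    · -- normal step at position m
      have hstep : pvScanStep s st (m : Int) =
          (st.2.filter (fun w => PySem.Chars.startswith (s.drop ((m : Int)).toNat) w.toList)).foldl
            (fun st w => (st.1.insert w (m : Int), PySem.Set.discard st.2 w)) st := by
        unfold pvScanStep; rw [if_neg hemp]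
      rw [hstep]
      have htn : ((m : Int)).toNat = m := Int.toNat_natCast m
      set hits := st.2.filter (fun w => PySem.Chars.startswith (s.drop ((m : Int)).toNat) w.toList) with hhits
      have hhit : ∀ x, x ∈ hits ↔ x ∈ st.2 ∧ x.toList <+: s.drop m := by
        intro x
        rw [hhits, List.mem_filter, htn]
        constructor
        · rintro ⟨h1, h2⟩; exact ⟨h1, (PySem.Chars.startswith_iff _ _).mp h2⟩
        · rintro ⟨h1, h2⟩; exact ⟨h1, (PySem.Chars.startswith_iff _ _).mpr h2⟩
      refine ⟨pv_step_nodup _ _ _ hnd, ?_, ?_⟩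
      · intro w
        rw [pv_step_mem, hmem w, hhit w]
        constructor
        · rintro ⟨⟨hw, hc⟩, hnh⟩
          refine ⟨hw, ?_⟩
          rintro ⟨hne, hlt⟩
          have hm : (PySem.Chars.find s w.toList).toNat = m := by
            by_contra hmm
            exact hc ⟨hne, by omega⟩
          have hocc : w.toList <+: s.drop m := hm ▸ (pv_find_spec s w.toList hne).2.1
          exact hnh ⟨(hmem w).mpr ⟨hw, hc⟩, hocc⟩
        · rintro ⟨hw, hc⟩
          have hc' : ¬(PySem.Chars.find s w.toList ≠ -1 ∧ (PySem.Chars.find s w.toList).toNat < m) := by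
            intro h; exact hc ⟨h.1, by omega⟩
          refine ⟨⟨hw, hc'⟩, ?_⟩
          rintro ⟨_, hocc⟩
          have heq := pv_find_eq_of_occ_not_lt s w.toList m hocc hc'
          exact hc ⟨by rw [heq]; omega, by omega⟩
      · intro w
        rw [pv_step_get?, hget w]
        by_cases hwh : w ∈ hits
        · rw [if_pos hwh]
          obtain ⟨hwp, hocc⟩ := (hhit w).mp hwh
          obtain ⟨hw, hc⟩ := (hmem w).mp hwp
          have heq := pv_find_eq_of_occ_not_lt s w.toList m hocc hc
          rw [if_pos ⟨hw, by rw [heq]; omega, by rw [heq]; omega⟩, heq]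
        · rw [if_neg hwh]
          by_cases hcond : w ∈ sw ∧ PySem.Chars.find s w.toList ≠ -1 ∧ (PySem.Chars.find s w.toList).toNat < m
          · rw [if_pos hcond, if_pos ⟨hcond.1, hcond.2.1, by omega⟩]
          · rw [if_neg hcond]
            rw [if_neg ?_]
            rintro ⟨hw, hne, hlt⟩
            have hc' : ¬(PySem.Chars.find s w.toList ≠ -1 ∧ (PySem.Chars.find s w.toList).toNat < m) := by
              intro h; exact hcond ⟨hw, h⟩
            have hm : (PySem.Chars.find s w.toList).toNat = m := by
              by_contra hmm
              exact hc' ⟨hne, by omega⟩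
            have hocc : w.toList <+: s.drop m := hm ▸ (pv_find_spec s w.toList hne).2.1
            exact hwh ((hhit w).mpr ⟨(hmem w).mpr ⟨hw, hc'⟩, hocc⟩)

-- A's snippet equals B's snippet at the same position
theorem pv_snippet_eq (string : String) (pos : Int) (h0 : 0 ≤ pos) :
    PySem.Str.strip (PySem.Str.slice string (some (if pos - 20 ≥ 0 then pos - 20 else 0))
        (some (if pos + 30 ≤ PySem.Str.len string then pos + 30 else PySem.Str.len string)))
      = PySem.Str.strip (PySem.Str.slice string (some (max 0 (pos - 20))) (some (pos + 30))) := by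
  have hstart : (if pos - 20 ≥ 0 then pos - 20 else 0) = max 0 (pos - 20) := by omega
  rw [hstart]
  by_cases hend : pos + 30 ≤ PySem.Str.len string
  · rw [if_pos hend]
  · rw [if_neg hend]
    rw [PySem.Str.len_eq] at hend
    simp only [PySem.Str.strip, PySem.Str.slice, PySem.Chars.slice_eq_listSlice]
    rw [PySem.List.slice_toNat _ (by omega) (by rw [PySem.Str.len_eq]; omega),
        PySem.List.slice_toNat _ (by omega) (by omega)]
    rw [PySem.Str.len_eq]
    rw [List.take_of_length_le (by rw [List.length_drop]; omega),
        List.take_of_length_le (by rw [List.length_drop]; omega)]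

-- the two output folds agree element by element
theorem pv_out_fold (string : String) (d : PySem.Dict String Int) (l : List String) (acc : List String)
    (hd : ∀ w ∈ l, d.get? w =
      if PySem.Str.find string w = -1 then none else some (PySem.Str.find string w)) :
    l.foldl (fun acc rule =>
      let pos := PySem.Str.find string rule
      if pos = -1 then acc
      else
        let start_pos : Int := if pos - 20 ≥ 0 then pos - 20 else 0
        let end_pos : Int := if pos + 30 ≤ PySem.Str.len string then pos + 30 else PySem.Str.len string
        acc ++ [PySem.Str.strip (PySem.Str.slice string (some start_pos) (some end_pos))]) acc
    = l.foldl (fun acc w =>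
        match d.get? w with
        | some p => acc ++ [PySem.Str.strip (PySem.Str.slice string (some (max 0 (p - 20))) (some (p + 30)))]
        | none => acc) acc := by
  induction l generalizing acc with
  | nil => rfl
  | cons w t ih =>
    simp only [List.foldl_cons]
    have hw := hd w (List.mem_cons_self ..)
    by_cases hfw : PySem.Str.find string w = -1
    · rw [if_pos hfw] at hw ⊢
      rw [hw]
      exact ih _ (fun x hx => hd x (List.mem_cons_of_mem _ hx))
    · rw [if_neg hfw] at hw ⊢
      rw [hw]
      have h0 : 0 ≤ PySem.Str.find string w := by
        have := (pv_find_spec string.toList w.toList (by simpa [PySem.Str.find] using hfw)).1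
        simpa [PySem.Str.find] using this
      rw [pv_snippet_eq string _ h0]
      exact ih _ (fun x hx => hd x (List.mem_cons_of_mem _ hx))


-- ===== VERDICT (by name: the statement is the Claim_ definition above) =====
theorem show_suspected_code_spec : Claim_equal_show_suspected_code := by
  intro string sw _
  unfold Spec_show_suspected_code show_suspected_code show_suspected_code_alt
  have hstep : (fun (st : PySem.Dict String Int × PySem.Set String) i =>
      if st.2.isEmpty then st
      else
        let hits := st.2.filter (fun w => PySem.Chars.startswith (string.toList.drop i.toNat) w.toList)
        hits.foldl (fun st w => (st.1.insert w i, PySem.Set.discard st.2 w)) st)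
      = pvScanStep string.toList := rfl
  rw [hstep]
  have hlen : PySem.Str.len string + 1 = ((string.toList.length + 1 : Nat) : Int) := by
    rw [PySem.Str.len_eq]; push_cast; ring
  rw [hlen]
  apply pv_out_fold
  intro w hw
  have hget := (pv_scan_invariant string.toList sw (string.toList.length + 1)).2.2 w
  rw [hget]
  by_cases hfw : PySem.Str.find string w = -1
  · rw [if_pos hfw, if_neg ?_]
    rintro ⟨_, hne, _⟩
    exact hne (by simpa [PySem.Str.find] using hfw)
  · have hne : PySem.Chars.find string.toList w.toList ≠ -1 := by simpa [PySem.Str.find] using hfw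
    rw [if_neg hfw, if_pos ⟨hw, hne, by have := pv_find_le_len string.toList w.toList hne; omega⟩]
    simp [PySem.Str.find]
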